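-- pv_equiv track=rewrite | github.com/sarvex/pmtech | tools/pmbuild_ext/jsn.py | collapse_line_breaks
-- ===== SOURCE A (Python) =====
-- def is_inside_quotes(str_list, pos):
--     for s in str_list:
--         if pos < s[0]:
--             break
--         if s[0] < pos < s[1]:
--             return s[1]+1
--     return 0
--
-- def find_strings(jsn):
--     quote_types = ["\"", "'"]
--     oq = ""
--     prev_char = ""
--     istart = -1
--     str_list = []
--     for ic in range(0, len(jsn)):
--         c = jsn[ic]
--         if c in quote_types:
--             if oq == "":
--                 oq = c
--                 istart = ic
--             elif oq == c and prev_char != "\\":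
--                 oq = ""
--                 str_list.append((istart, ic))
--         prev_char = "" if prev_char == "\\" and c == "\\" else c
--     return str_list
--
-- def collapse_line_breaks(jsn):
--     str_list = find_strings(jsn)
--     conditioned = ""
--     skip = False
--     for c in range(0, len(jsn)):
--         char = jsn[c]
--         if skip:
--             skip = False
--             continue
--         if (
--             char == "\\"
--             and c + 1 < len(jsn)
--             and jsn[c + 1] == "\n"
--             and is_inside_quotes(str_list, c)
--         ):
--             skip = True
--             continue
--         conditioned += char
--     return conditioned
-- ===== SOURCE B (Python) =====
-- def _find_quoted_spans(jsn):
--     # One pass: collect (open, close) index pairs of completed quoted strings.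
--     # esc is True iff the previous char was an escaping backslash (odd run).
--     spans = []
--     oq = None
--     start = -1
--     esc = False
--     for i, c in enumerate(jsn):
--         if c == '"' or c == "'":
--             if oq is None:
--                 oq = c
--                 start = i
--             elif c == oq and not esc:
--                 oq = None
--                 spans.append((start, i))
--         esc = (c == "\\") and not esc
--     return spans
--
--
-- def collapse_line_breaks(jsn):
--     # Stitch together: text outside strings verbatim, each string interior
--     # with backslash-newline pairs removed via str.replace.
--     parts = []
--     prev = 0
--     for s0, s1 in _find_quoted_spans(jsn):
--         parts.append(jsn[prev:s0 + 1])
--         parts.append(jsn[s0 + 1:s1].replace("\\\n", ""))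
--         prev = s1
--     parts.append(jsn[prev:])
--     return "".join(parts)
-- ===== Notes on version B (the rewrite author's own statement) =====
-- stated objective: faster
-- what changed: B slices the input at precomputed quoted spans and removes backslash-newline pairs with one replace per span interior (spans consumed monotonically), instead of A's per-character loop that rescans the whole span list at every backslash-newline candidate.
import Mathlib
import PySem

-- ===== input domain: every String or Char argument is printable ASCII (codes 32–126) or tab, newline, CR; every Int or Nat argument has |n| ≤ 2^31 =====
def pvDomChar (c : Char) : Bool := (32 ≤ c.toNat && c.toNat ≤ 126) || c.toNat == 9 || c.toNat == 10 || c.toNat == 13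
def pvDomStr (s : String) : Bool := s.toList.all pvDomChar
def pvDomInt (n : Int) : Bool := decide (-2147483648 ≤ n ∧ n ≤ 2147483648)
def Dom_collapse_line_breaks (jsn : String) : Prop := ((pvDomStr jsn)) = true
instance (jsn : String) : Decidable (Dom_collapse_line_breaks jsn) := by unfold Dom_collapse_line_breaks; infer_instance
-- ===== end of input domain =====

-- B removes backslash-newline pairs inside completed quoted strings by slicing the input at the
-- quoted spans and running one `replace` per span interior, instead of A's per-character loop that
-- rescans the whole span list at every candidate backslash (objective: alternative/faster mechanism).

-- ===== PORT A =====

-- is_inside_quotes: linear scan with early break; Python truthiness of its int result is `≠ 0` at the call site.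
def isInsideQuotes (strList : List (Int × Int)) (pos : Int) : Int :=
  match strList with
  | [] => 0
  | s :: rest =>
      if pos < s.1 then 0
      else if s.1 < pos ∧ pos < s.2 then s.2 + 1
      else isInsideQuotes rest pos

-- one iteration of find_strings' for-loop; state = (oq, prev_char, istart, str_list);
-- Python's "" sentinels for oq/prev_char are `none`.
def findStringsStep (st : Option Char × Option Char × Int × List (Int × Int)) (ci : Char × Nat) :
    Option Char × Option Char × Int × List (Int × Int) :=
  let oq := st.1
  let prev := st.2.1
  let istart := st.2.2.1
  let acc := st.2.2.2
  let c := ci.1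
  let ic : Int := (ci.2 : Int)
  let next :=
    if c = '"' ∨ c = '\'' then
      if oq = none then (some c, ic, acc)
      else if oq = some c ∧ prev ≠ some '\\' then (none, istart, acc ++ [(istart, ic)])
      else (oq, istart, acc)
    else (oq, istart, acc)
  let prev' : Option Char := if prev = some '\\' ∧ c = '\\' then none else some c
  (next.1, prev', next.2.1, next.2.2)

def findStrings (l : List Char) : List (Int × Int) :=
  (l.zipIdx.foldl findStringsStep (none, none, -1, [])).2.2.2

-- one iteration of collapse_line_breaks' for-loop; state = (conditioned, skip).
-- `jsn[c+1]` exists and equals '\n'  ⇔  pyGet? l (i+1) = some '\n' (index is nonnegative here).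
def collapseStep (l : List Char) (strList : List (Int × Int)) (st : List Char × Bool)
    (ci : Char × Nat) : List Char × Bool :=
  if st.2 then (st.1, false)
  else if ci.1 = '\\' ∧ PySem.List.pyGet? l ((ci.2 : Int) + 1) = some '\n' ∧
      isInsideQuotes strList (ci.2 : Int) ≠ 0 then (st.1, true)
  else (st.1 ++ [ci.1], false)

def collapse_line_breaks (jsn : String) : String :=
  let l := jsn.toList
  let strList := findStrings l
  String.ofList ((l.zipIdx.foldl (collapseStep l strList) ([], false)).1)

-- ===== PORT B =====

-- one iteration of _find_quoted_spans' loop; state = (spans, oq, start, esc).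
def spanStep (st : List (Int × Int) × Option Char × Int × Bool) (ci : Char × Nat) :
    List (Int × Int) × Option Char × Int × Bool :=
  let spans := st.1
  let oq := st.2.1
  let start := st.2.2.1
  let esc := st.2.2.2
  let c := ci.1
  let i : Int := (ci.2 : Int)
  let next :=
    if c = '"' ∨ c = '\'' then
      if oq = none then (spans, some c, i)
      else if oq = some c ∧ esc = false then (spans ++ [(start, i)], none, start)
      else (spans, oq, start)
    else (spans, oq, start)
  (next.1, next.2.1, next.2.2, decide (c = '\\') && !esc)

def findQuotedSpans (l : List Char) : List (Int × Int) :=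
  (l.zipIdx.foldl spanStep ([], none, -1, false)).1

-- one iteration of collapse_line_breaks' (B) loop; state = (joined parts, prev);
-- jsn[prev:s0+1] and jsn[s0+1:s1] are PySem slices, .replace("\\\n","") is PySem.Chars.replace.
def stitchStep (l : List Char) (st : List Char × Int) (sp : Int × Int) : List Char × Int :=
  (st.1 ++ PySem.List.slice l (some st.2) (some (sp.1 + 1)) ++
      PySem.Chars.replace (PySem.List.slice l (some (sp.1 + 1)) (some sp.2)) ['\\', '\n'] [],
   sp.2)

def collapse_line_breaks_alt (jsn : String) : String :=
  let l := jsn.toList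
  let r := (findQuotedSpans l).foldl (stitchStep l) ([], 0)
  String.ofList (r.1 ++ PySem.List.slice l (some r.2) none)

-- ===== PRECONDITION & SPEC =====
def Spec_collapse_line_breaks (jsn : String) (out : String) : Prop := out = collapse_line_breaks_alt jsn
instance (jsn : String) (out : String) : Decidable (Spec_collapse_line_breaks jsn out) := by unfold Spec_collapse_line_breaks; infer_instance

-- ===== CLAIM (what is proved, stated in full; the proofs are below) =====
def Claim_equal_collapse_line_breaks : Prop := ∀ (jsn : String), Dom_collapse_line_breaks jsn → Spec_collapse_line_breaks jsn (collapse_line_breaks jsn)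

-- ===== LEMMAS AND PROOFS =====

-- common specification: walk the characters at absolute index i, dropping "\\\n" pairs strictly
-- inside a recorded span (A's truthiness test verbatim)
def specGo (strList : List (Int × Int)) : Nat → List Char → List Char
  | _, [] => []
  | _, [a] => [a]
  | i, a :: b :: t =>
      if a = '\\' ∧ b = '\n' ∧ isInsideQuotes strList (i : Int) ≠ 0 then specGo strList (i + 2) t
      else a :: specGo strList (i + 1) (b :: t)
  termination_by _ l => l.length

-- reference form of one `replace("\\\n","")`
def collapseInner : List Char → List Char
  | [] => []
  | [a] => [a]
  | a :: b :: t => if a = '\\' ∧ b = '\n' then collapseInner t else a :: collapseInner (b :: t)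
  termination_by l => l.length


-- `\\\n`-free tail characterisation of collapseInner at a head that is not such a pair
theorem collapseInner_cons_of_not (a : Char) (t : List Char)
    (h : ∀ b t', t = b :: t' → ¬(a = '\\' ∧ b = '\n')) :
    collapseInner (a :: t) = a :: collapseInner t := by
  cases t with
  | nil => simp [collapseInner]
  | cons b t' =>
      rw [collapseInner]
      simp [h b t' rfl]

-- str.replace with pattern "\\\n" and empty replacement is collapseInner
theorem replaceGo_eq (fuel : Nat) : ∀ (w acc : List Char), w.length ≤ fuel →
    PySem.Chars.replace.go ['\\', '\n'] [] fuel w acc = acc.reverse ++ collapseInner w := by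
  induction fuel with
  | zero =>
      intro w acc h
      have : w = [] := by cases w <;> simp_all
      subst this
      simp [PySem.Chars.replace.go, collapseInner]
  | succ n ih =>
      intro w acc h
      cases w with
      | nil => simp [PySem.Chars.replace.go, collapseInner]
      | cons c t =>
          rw [PySem.Chars.replace.go]
          by_cases hpre : List.isPrefixOf ['\\', '\n'] (c :: t) = true
          · obtain ⟨hc, ht⟩ : c = '\\' ∧ ∃ t', t = '\n' :: t' := by
              cases t with
              | nil => simp [List.isPrefixOf] at hpre
              | cons b t' =>
                  simp [List.isPrefixOf] at hpre
                  exact ⟨hpre.1.symm, t', by rw [← hpre.2]⟩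
            obtain ⟨t', rfl⟩ := ht
            subst hc
            simp only [hpre, if_true]
            have hdrop : List.drop ['\\', '\n'].length ('\\' :: '\n' :: t') = t' := rfl
            rw [hdrop, ih t' ([].reverse ++ acc) (by simp at h; omega)]
            simp [collapseInner]
          · simp only [hpre]
            rw [ih t (c :: acc) (by simp at h; omega)]
            rw [collapseInner_cons_of_not]
            · simp
            · intro b t' het hab
              apply hpre
              rw [het, hab.1, hab.2]
              simp [List.isPrefixOf]

theorem replace_eq (w : List Char) :
    PySem.Chars.replace w ['\\', '\n'] [] = collapseInner w := by
  rw [PySem.Chars.replace]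
  simp only [List.isEmpty]
  exact (replaceGo_eq w.length w [] le_rfl).trans (by simp)

-- sortedness of the recorded spans: each span ends before every later span starts
def SpansSorted : List (Int × Int) → Prop
  | [] => True
  | p :: rest => (∀ q ∈ rest, p.2 < q.1) ∧ SpansSorted rest

theorem spansSorted_append (acc : List (Int × Int)) (x : Int × Int)
    (hs : SpansSorted acc) (hlt : ∀ p ∈ acc, p.2 < x.1) :
    SpansSorted (acc ++ [x]) := by
  induction acc with
  | nil => exact ⟨by simp, trivial⟩
  | cons p rest ih =>
      obtain ⟨h1, h2⟩ := hs
      refine ⟨?_, ih h2 (fun q hq => hlt q (by simp [hq]))⟩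
      intro q hq
      rcases List.mem_append.1 hq with h | h
      · exact h1 q h
      · simp at h; subst h; exact hlt p (by simp)

-- the per-span facts we need downstream
def SpanFacts (l : List Char) (p : Int × Int) : Prop :=
  0 ≤ p.1 ∧ p.1 < p.2 ∧ p.2 < (l.length : Int) ∧
    (l[p.2.toNat]? = some '"' ∨ l[p.2.toNat]? = some '\'')

-- truthiness of is_inside_quotes on a sorted span list = "some span strictly contains pos"
theorem inside_iff (l : List Char) (S : List (Int × Int)) (hs : SpansSorted S)
    (hf : ∀ p ∈ S, SpanFacts l p) (pos : Int) :
    isInsideQuotes S pos ≠ 0 ↔ ∃ p ∈ S, p.1 < pos ∧ pos < p.2 := by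
  induction S with
  | nil => simp [isInsideQuotes]
  | cons s rest ih =>
      obtain ⟨h1, h2⟩ := hs
      have hsf := hf s (List.mem_cons_self ..)
      unfold SpanFacts at hsf
      obtain ⟨hs0, hs1, -, -⟩ := hsf
      simp only [isInsideQuotes]
      by_cases hlt : pos < s.1
      · rw [if_pos hlt]
        constructor
        · intro hc; exact absurd rfl hc
        · rintro ⟨p, hp, ha, hb⟩
          rcases List.mem_cons.1 hp with rfl | hp'
          · omega
          · have hrel := h1 p hp'
            have hpf := hf p (List.mem_cons_of_mem _ hp')
            unfold SpanFacts at hpf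
            obtain ⟨hp0, hp1, -, -⟩ := hpf
            omega
      · rw [if_neg hlt]
        by_cases hin : s.1 < pos ∧ pos < s.2
        · rw [if_pos hin]
          constructor
          · intro _; exact ⟨s, List.mem_cons_self .., hin⟩
          · intro _; omega
        · rw [if_neg hin]
          rw [ih h2 (fun p hp => hf p (List.mem_cons_of_mem _ hp))]
          constructor
          · rintro ⟨p, hp, h⟩; exact ⟨p, List.mem_cons_of_mem _ hp, h⟩
          · rintro ⟨p, hp, h⟩
            rcases List.mem_cons.1 hp with rfl | hp'
            · exact absurd h hin
            · exact ⟨p, hp', h⟩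

-- the two scanners produce the same span list
theorem scan_agree (xs : List (Char × Nat)) :
    ∀ (oq prev : Option Char) (istart : Int) (acc : List (Int × Int)),
    (let ra := xs.foldl findStringsStep (oq, prev, istart, acc)
     let rb := xs.foldl spanStep (acc, oq, istart, decide (prev = some '\\'))
     ra.2.2.2 = rb.1 ∧ ra.1 = rb.2.1 ∧ ra.2.2.1 = rb.2.2.1 ∧
       rb.2.2.2 = decide (ra.2.1 = some '\\')) := by
  induction xs with
  | nil => intro oq prev istart acc; exact ⟨rfl, rfl, rfl, rfl⟩
  | cons ci rest ih =>
      intro oq prev istart acc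
      simp only [List.foldl_cons]
      have hesc' : (decide (ci.1 = '\\') && !decide (prev = some '\\')) =
          decide ((if prev = some '\\' ∧ ci.1 = '\\' then (none : Option Char) else some ci.1) = some '\\') := by
        by_cases hp : prev = some '\\' <;> by_cases hc : ci.1 = '\\' <;> simp [hp, hc]
      simp only [findStringsStep, spanStep]
      rw [hesc']
      by_cases hq : ci.1 = '"' ∨ ci.1 = '\''
      · rw [if_pos hq, if_pos hq]
        by_cases ho : oq = none
        · rw [if_pos ho, if_pos ho]
          exact ih _ _ _ _
        · rw [if_neg ho, if_neg ho]
          by_cases hp : prev = some '\\'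
          · have hA : ¬(oq = some ci.1 ∧ prev ≠ some '\\') := fun hx => hx.2 hp
            have hB : ¬(oq = some ci.1 ∧ decide (prev = some '\\') = false) := by
              intro hx
              rw [hp] at hx
              simp at hx
            rw [if_neg hA, if_neg hB]
            exact ih _ _ _ _
          · by_cases hoc : oq = some ci.1
            · have hA : oq = some ci.1 ∧ prev ≠ some '\\' := ⟨hoc, hp⟩
              have hB : oq = some ci.1 ∧ decide (prev = some '\\') = false := ⟨hoc, by simpa using hp⟩
              rw [if_pos hA, if_pos hB]
              exact ih _ _ _ _
            · rw [if_neg (fun hx => hoc hx.1), if_neg (fun (hx : _ ∧ _) => hoc hx.1)]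
              exact ih _ _ _ _
      · rw [if_neg hq, if_neg hq]
        exact ih _ _ _ _

theorem findStrings_eq (l : List Char) : findStrings l = findQuotedSpans l := by
  have h := (scan_agree l.zipIdx none none (-1) []).1
  unfold findStrings findQuotedSpans
  simpa using h

-- invariant of the scanner: the recorded spans are sorted, in range, and end at a quote
def ScanInv (l : List Char) (k : Nat) (st : Option Char × Option Char × Int × List (Int × Int)) : Prop :=
  SpansSorted st.2.2.2 ∧ (∀ p ∈ st.2.2.2, SpanFacts l p ∧ p.2 < (k : Int)) ∧
    (st.1 = none ∨ (0 ≤ st.2.2.1 ∧ st.2.2.1 < (k : Int) ∧ ∀ p ∈ st.2.2.2, p.2 < st.2.2.1))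

theorem scan_inv (l : List Char) (t : List Char) : ∀ (k : Nat) (st : Option Char × Option Char × Int × List (Int × Int)),
    l.drop k = t → ScanInv l k st → ScanInv l (k + t.length) ((t.zipIdx k).foldl findStringsStep st) := by
  induction t with
  | nil => intro k st _ h; simpa using h
  | cons c t' ih =>
      intro k st hdrop hinv
      obtain ⟨oq, prev, istart, acc⟩ := st
      have hget : l[k]? = some c := by
        have h0 : (l.drop k)[0]? = l[k + 0]? := List.getElem?_drop
        rw [hdrop] at h0
        simpa using h0.symm
      have hklen : k < l.length := (List.getElem?_eq_some_iff.1 hget).1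
      have hdrop' : l.drop (k + 1) = t' := by
        have h1 : l.drop (k + 1) = List.drop 1 (l.drop k) := by rw [List.drop_drop]
        rw [h1, hdrop]
        simp
      rw [List.zipIdx_cons, List.foldl_cons]
      have hstep : ScanInv l (k + 1) (findStringsStep (oq, prev, istart, acc) (c, k)) := by
        obtain ⟨hsort, hfacts, hoq⟩ := hinv
        dsimp only at hsort hfacts hoq
        unfold ScanInv
        simp only [findStringsStep]
        by_cases hq : c = '"' ∨ c = '\''
        · rw [if_pos hq]
          by_cases ho : oq = none
          · rw [if_pos ho]
            dsimp only
            refine ⟨hsort, fun p hp => ⟨(hfacts p hp).1, by have := (hfacts p hp).2; push_cast; omega⟩, ?_⟩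
            right
            refine ⟨by positivity, by push_cast; omega, fun p hp => (hfacts p hp).2⟩
          · rw [if_neg ho]
            rcases hoq with h | ⟨hi0, hik, hlast⟩
            · exact absurd h ho
            by_cases hcl : oq = some c ∧ prev ≠ some '\\'
            · rw [if_pos hcl]
              dsimp only
              refine ⟨spansSorted_append acc (istart, (k : Int)) hsort (fun p hp => hlast p hp), ?_, Or.inl rfl⟩
              intro p hp
              rcases List.mem_append.1 hp with hp' | hp'
              · exact ⟨(hfacts p hp').1, by have := (hfacts p hp').2; push_cast; omega⟩
              · simp at hp'
                subst hp'
                refine ⟨⟨hi0, hik, by dsimp only; exact_mod_cast hklen, ?_⟩, by dsimp only; push_cast; omega⟩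
                have hk0 : ((k : Int)).toNat = k := by omega
                dsimp only
                rw [hk0]
                rcases hq with h | h
                · left; rw [← h]; exact hget
                · right; rw [← h]; exact hget
            · rw [if_neg hcl]
              dsimp only
              refine ⟨hsort, fun p hp => ⟨(hfacts p hp).1, by have := (hfacts p hp).2; push_cast; omega⟩, ?_⟩
              right
              exact ⟨hi0, by push_cast; omega, hlast⟩
        · rw [if_neg hq]
          dsimp only
          refine ⟨hsort, fun p hp => ⟨(hfacts p hp).1, by have := (hfacts p hp).2; push_cast; omega⟩, ?_⟩
          rcases hoq with h | ⟨hi0, hik, hlast⟩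
          · exact Or.inl h
          · exact Or.inr ⟨hi0, by push_cast; omega, hlast⟩
      have hrec := ih (k + 1) _ hdrop' hstep
      have harith : k + 1 + t'.length = k + (c :: t').length := by simp; omega
      rw [harith] at hrec
      exact hrec

theorem spans_ok (l : List Char) :
    SpansSorted (findStrings l) ∧ ∀ p ∈ findStrings l, SpanFacts l p := by
  have h0 : ScanInv l 0 ((none : Option Char), (none : Option Char), (-1 : Int), ([] : List (Int × Int))) := by
    refine ⟨trivial, by simp, Or.inl rfl⟩
  have h := scan_inv l l 0 _ (by simp) h0
  obtain ⟨hsort, hfacts, -⟩ := h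
  exact ⟨hsort, fun p hp => (hfacts p hp).1⟩

-- segment lemma: no span strictly contains any position of u → the walk copies u
theorem specGo_keep (S : List (Int × Int)) (u : List Char) : ∀ (v : List Char) (k : Nat),
    (∀ j < u.length, isInsideQuotes S ((k : Int) + (j : Int)) = 0) →
    specGo S k (u ++ v) = u ++ specGo S (k + u.length) v := by
  induction u with
  | nil => intro v k _; simp
  | cons a u' ih =>
      intro v k h
      have h0 : isInsideQuotes S (k : Int) = 0 := by simpa using h 0 (by simp)
      cases hcv : u' ++ v with
      | nil =>
          obtain ⟨hu, hv⟩ := List.append_eq_nil_iff.1 hcv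
          subst hu; subst hv
          simp [specGo]
      | cons b t =>
          have hc : (a :: u') ++ v = a :: b :: t := by simp [hcv]
          rw [hc]
          simp only [specGo]
          rw [if_neg (by intro hx; exact hx.2.2 h0)]
          rw [← hcv]
          rw [ih v (k + 1) (fun j hj => by
            have hres := h (j + 1) (by simp only [List.length_cons]; omega)
            have harr : ((k + 1 : Nat) : Int) + (j : Int) = (k : Int) + ((j + 1 : Nat) : Int) := by
              push_cast; ring
            rw [harr]
            exact hres)]
          have harith : k + 1 + u'.length = k + (a :: u').length := by simp; omega
          rw [harith]
          simp

-- segment lemma: every position of w is strictly inside a span and the next char is not '\n'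
-- → the walk performs collapseInner on w
theorem specGo_inner (S : List (Int × Int)) (w : List Char) : ∀ (v : List Char) (k : Nat),
    (∀ j < w.length, isInsideQuotes S ((k : Int) + (j : Int)) ≠ 0) →
    (∀ c, v.head? = some c → c ≠ '\n') →
    specGo S k (w ++ v) = collapseInner w ++ specGo S (k + w.length) v := by
  induction w using collapseInner.induct with
  | case1 => intro v k _ _; simp [collapseInner]
  | case2 a =>
      intro v k h hv
      cases v with
      | nil => simp [specGo, collapseInner]
      | cons c v' =>
          have hc : [a] ++ c :: v' = a :: c :: v' := by simp
          rw [hc]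
          simp only [specGo]
          rw [if_neg (by intro hx; exact hv c rfl hx.2.1)]
          simp [collapseInner]
  | case3 a b t hab ih =>
      intro v k h hv
      obtain ⟨ha, hb⟩ := hab
      subst ha; subst hb
      have hc : ('\\' :: '\n' :: t) ++ v = '\\' :: '\n' :: (t ++ v) := by simp
      rw [hc]
      simp only [specGo]
      rw [if_pos (by refine ⟨?_, ?_, by simpa using h 0 (by simp)⟩ <;> first | exact trivial | rfl)]
      rw [ih v (k + 2) (fun j hj => by
        have hres := h (j + 2) (by simp only [List.length_cons]; omega)
        have harr : ((k + 2 : Nat) : Int) + (j : Int) = (k : Int) + ((j + 2 : Nat) : Int) := by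
          push_cast; ring
        rw [harr]
        exact hres) hv]
      rw [collapseInner, if_pos (by refine ⟨?_, ?_⟩ <;> first | exact trivial | rfl)]
      have harith : k + 2 + t.length = k + ('\\' :: '\n' :: t).length := by simp; omega
      rw [harith]
  | case4 a b t hab ih =>
      intro v k h hv
      have hc : (a :: b :: t) ++ v = a :: b :: (t ++ v) := by simp
      rw [hc]
      simp only [specGo]
      rw [if_neg (by intro hx; exact hab ⟨hx.1, hx.2.1⟩)]
      have hbt : b :: (t ++ v) = (b :: t) ++ v := by simp
      rw [hbt]
      rw [ih v (k + 1) (fun j hj => by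
        have hres := h (j + 1) (by simp only [List.length_cons] at hj ⊢; omega)
        have harr : ((k + 1 : Nat) : Int) + (j : Int) = (k : Int) + ((j + 1 : Nat) : Int) := by
          push_cast; ring
        rw [harr]
        exact hres) hv]
      rw [collapseInner, if_neg hab]
      have harith : k + 1 + (b :: t).length = k + (a :: b :: t).length := by simp; omega
      rw [harith]
      simp

-- A's main loop is the walk
theorem loopA_eq (l : List Char) (S : List (Int × Int)) :
    ∀ (n : Nat) (t : List Char), t.length ≤ n → ∀ (k : Nat) (acc : List Char), l.drop k = t →
    ((t.zipIdx k).foldl (collapseStep l S) (acc, false)).1 = acc ++ specGo S k t := by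
  intro n
  induction n with
  | zero =>
      intro t ht k acc _
      have : t = [] := by cases t <;> simp_all
      subst this
      simp [specGo]
  | succ n ih =>
      intro t ht k acc hdrop
      have hpy : PySem.List.pyGet? l ((k : Int) + 1) = l[k + 1]? := by
        rw [show ((k : Int) + 1) = ((k + 1 : Nat) : Int) by push_cast; ring]
        exact PySem.List.pyGet?_natCast l (k + 1)
      match t with
      | [] => simp [specGo]
      | [a] =>
          have hget : l[k + 1]? = none := by
            have h01 : (l.drop k)[1]? = l[k + 1]? := List.getElem?_drop
            rw [hdrop] at h01
            simpa using h01.symm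
          rw [List.zipIdx_cons, List.foldl_cons]
          simp only [collapseStep]
          rw [if_neg (by simp)]
          rw [if_neg (by
            intro hx
            have hx2 := hx.2.1
            rw [hpy, hget] at hx2
            cases hx2)]
          simp [specGo]
      | a :: b :: t' =>
          have hgetb : l[k + 1]? = some b := by
            have h01 : (l.drop k)[1]? = l[k + 1]? := List.getElem?_drop
            rw [hdrop] at h01
            simpa using h01.symm
          have hdrop1 : l.drop (k + 1) = b :: t' := by
            have h1 : l.drop (k + 1) = List.drop 1 (l.drop k) := by rw [List.drop_drop]
            rw [h1, hdrop]
            simp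
          have hdrop2 : l.drop (k + 2) = t' := by
            have h1 : l.drop (k + 2) = List.drop 1 (l.drop (k + 1)) := by rw [List.drop_drop]
            rw [h1, hdrop1]
            simp
          rw [List.zipIdx_cons, List.foldl_cons]
          simp only [collapseStep]
          rw [if_neg (by simp)]
          by_cases hcond : a = '\\' ∧ b = '\n' ∧ isInsideQuotes S (k : Int) ≠ 0
          · rw [if_pos (by
              refine ⟨hcond.1, ?_, hcond.2.2⟩
              rw [hpy, hgetb, hcond.2.1])]
            rw [List.zipIdx_cons, List.foldl_cons]
            simp only [collapseStep]
            simp only [if_true]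
            have hres := ih t' (by simp at ht; omega) (k + 2) acc hdrop2
            rw [show k + 1 + 1 = k + 2 from rfl, hres]
            simp only [specGo]
            rw [if_pos hcond]
          · rw [if_neg (by
              intro hx
              apply hcond
              refine ⟨hx.1, ?_, hx.2.2⟩
              have hx2 := hx.2.1
              rw [hpy, hgetb] at hx2
              exact (Option.some_injective _ hx2).symm.symm)]
            have hres := ih (b :: t') (by simp at ht ⊢; omega) (k + 1) (acc ++ [a]) hdrop1
            rw [hres]
            simp only [specGo]
            rw [if_neg hcond]
            simp

-- B's stitching loop is the walk
theorem loopB_eq (l : List Char) (S : List (Int × Int)) (S' : List (Int × Int)) :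
    ∀ (prev : Nat) (parts : List Char),
    SpansSorted S' → (∀ p ∈ S', SpanFacts l p ∧ (prev : Int) ≤ p.1) →
    (∀ pos : Int, (prev : Int) ≤ pos →
      (isInsideQuotes S pos ≠ 0 ↔ ∃ p ∈ S', p.1 < pos ∧ pos < p.2)) →
    prev ≤ l.length →
    (let r := S'.foldl (stitchStep l) (parts, (prev : Int))
     r.1 ++ PySem.List.slice l (some r.2) none = parts ++ specGo S prev (l.drop prev)) := by
  induction S' with
  | nil =>
      intro prev parts _ _ hchar hlen
      simp only [List.foldl_nil]
      rw [PySem.List.slice_from_natCast]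
      have hkeep : ∀ j < (l.drop prev).length, isInsideQuotes S ((prev : Int) + (j : Int)) = 0 := by
        intro j hj
        have h := hchar ((prev : Int) + (j : Int)) (by omega)
        by_contra hne
        obtain ⟨p, hp, -⟩ := h.1 hne
        simp at hp
      have h1 := specGo_keep S (l.drop prev) [] prev hkeep
      rw [List.append_nil] at h1
      rw [h1]
      have h2 : specGo S (prev + (l.drop prev).length) ([] : List Char) = [] := by
        simp [specGo]
      rw [h2]
      simp
  | cons sp rest ih =>
      intro prev parts hsort hf hchar hlen
      obtain ⟨hsp, hrest⟩ := hsort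
      obtain ⟨⟨ha0, hab, hblen, hqb⟩, hprevle⟩ := hf sp (List.mem_cons_self ..)
      obtain ⟨na, hna⟩ : ∃ na : Nat, sp.1 = (na : Int) := ⟨sp.1.toNat, by omega⟩
      obtain ⟨nb, hnb⟩ : ∃ nb : Nat, sp.2 = (nb : Int) := ⟨sp.2.toNat, by omega⟩
      have hna_nb : na < nb := by omega
      have hprev_na : prev ≤ na := by omega
      have hnb_len : nb ≤ l.length := by
        have hx : (nb : Int) < (l.length : Int) := by omega
        exact_mod_cast le_of_lt hx
      have hna1_len : na + 1 ≤ l.length := by omega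
      simp only [List.foldl_cons]
      have hstep : stitchStep l (parts, (prev : Int)) sp =
          (parts ++ PySem.List.slice l (some (prev : Int)) (some ((na : Int) + 1)) ++
            PySem.Chars.replace (PySem.List.slice l (some ((na : Int) + 1)) (some (nb : Int))) ['\\', '\n'] [],
           (nb : Int)) := by
        simp only [stitchStep, hna, hnb]
      rw [hstep]
      have ihres := ih nb
        (parts ++ PySem.List.slice l (some (prev : Int)) (some ((na : Int) + 1)) ++
          PySem.Chars.replace (PySem.List.slice l (some ((na : Int) + 1)) (some (nb : Int))) ['\\', '\n'] [])
        hrest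
        (fun p hp => ⟨(hf p (List.mem_cons_of_mem _ hp)).1, by have := hsp p hp; omega⟩)
        (fun pos hpos => by
          rw [hchar pos (by omega)]
          constructor
          · rintro ⟨p, hp, hin⟩
            rcases List.mem_cons.1 hp with rfl | hp'
            · omega
            · exact ⟨p, hp', hin⟩
          · rintro ⟨p, hp, hin⟩
            exact ⟨p, List.mem_cons_of_mem _ hp, hin⟩)
        hnb_len
      rw [ihres]
      have hu : PySem.List.slice l (some (prev : Int)) (some ((na : Int) + 1)) =
          (l.drop prev).take (na + 1 - prev) := by
        rw [show ((na : Int) + 1) = ((na + 1 : Nat) : Int) by push_cast; ring]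
        exact PySem.List.slice_natCast l prev (na + 1)
      have hw : PySem.List.slice l (some ((na : Int) + 1)) (some (nb : Int)) =
          (l.drop (na + 1)).take (nb - (na + 1)) := by
        rw [show ((na : Int) + 1) = ((na + 1 : Nat) : Int) by push_cast; ring]
        exact PySem.List.slice_natCast l (na + 1) nb
      set u := (l.drop prev).take (na + 1 - prev) with hudef
      set w := (l.drop (na + 1)).take (nb - (na + 1)) with hwdef
      have hulen : u.length = na + 1 - prev := by
        rw [hudef]
        simp
        omega
      have hwlen : w.length = nb - (na + 1) := by
        rw [hwdef]
        simp
        omega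
      have hsplit1 : l.drop prev = u ++ l.drop (na + 1) := by
        rw [hudef]
        have hdd : List.drop (na + 1 - prev) (l.drop prev) = l.drop (na + 1) := by
          rw [List.drop_drop]
          congr 1
          omega
        conv_lhs => rw [← List.take_append_drop (na + 1 - prev) (l.drop prev)]
        rw [hdd]
      have hsplit2 : l.drop (na + 1) = w ++ l.drop nb := by
        rw [hwdef]
        have hdd : List.drop (nb - (na + 1)) (l.drop (na + 1)) = l.drop nb := by
          rw [List.drop_drop]
          congr 1
          omega
        conv_lhs => rw [← List.take_append_drop (nb - (na + 1)) (l.drop (na + 1))]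
        rw [hdd]
      have hwalk : specGo S prev (l.drop prev) =
          u ++ (collapseInner w ++ specGo S nb (l.drop nb)) := by
        conv_lhs => rw [hsplit1, hsplit2]
        rw [specGo_keep S u (w ++ l.drop nb) prev (by
          intro j hj
          rw [hulen] at hj
          have h := hchar ((prev : Int) + (j : Int)) (by omega)
          by_contra hne
          obtain ⟨p, hp, hin1, hin2⟩ := h.1 hne
          clear hne h
          rcases List.mem_cons.1 hp with rfl | hp'
          · omega
          · have := hsp p hp'
            omega)]
        have hidx1 : prev + u.length = na + 1 := by omega
        rw [hidx1]
        rw [specGo_inner S w (l.drop nb) (na + 1) (by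
          intro j hj
          rw [hwlen] at hj
          have h := hchar (((na + 1 : Nat) : Int) + (j : Int)) (by push_cast; omega)
          rw [h]
          refine ⟨sp, List.mem_cons_self .., by push_cast; omega, by push_cast; omega⟩)
          (by
          intro c hc hcn
          have hdnb : (l.drop nb)[0]? = l[nb]? := by
            have h0 : (l.drop nb)[0]? = l[nb + 0]? := List.getElem?_drop
            simpa using h0
          rw [List.head?_eq_getElem?, hdnb] at hc
          have hbnat : ((nb : Int)).toNat = nb := by omega
          rw [hnb, hbnat] at hqb
          rcases hqb with hqb | hqb <;> rw [hc] at hqb <;> rw [hcn] at hqb <;> cases hqb <;> contradiction)]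
        have hidx2 : na + 1 + w.length = nb := by omega
        rw [hidx2]
      rw [hwalk, hu, hw, replace_eq]
      simp

-- ===== VERDICT (by name: the statement is the Claim_ definition above) =====
theorem collapse_line_breaks_spec : Claim_equal_collapse_line_breaks := by
  intro jsn _
  unfold Spec_collapse_line_breaks collapse_line_breaks collapse_line_breaks_alt
  simp only []
  obtain ⟨hsort, hfacts⟩ := spans_ok jsn.toList
  have hA := loopA_eq jsn.toList (findStrings jsn.toList) jsn.toList.length jsn.toList le_rfl 0
    [] (by simp)
  have hB := loopB_eq jsn.toList (findStrings jsn.toList) (findStrings jsn.toList) 0 []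
    hsort
    (fun p hp => ⟨hfacts p hp, by have := (hfacts p hp).1; simpa using this⟩)
    (fun pos _ => inside_iff jsn.toList (findStrings jsn.toList) hsort hfacts pos)
    (by omega)
  rw [← findStrings_eq] at *
  simp only [Nat.cast_zero] at hB
  rw [hA]
  rw [hB]
  simp
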